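-- pv_equiv track=rewrite | github.com/YuexinChen96/Poke_Battle | Spell.py | rangeCal
-- ===== SOURCE A (Python) =====
-- def rangeCal(x, y, n):
-- 	if n == 1:
-- 		if x % 2 == 0:
-- 			return [[x - 1,y - 1],[x - 2,y],[x - 1,y],[x + 1,y - 1],[x + 1,y],[x + 2,y]]
-- 		if x % 2 == 1:
-- 			return [[x - 1, y],[x - 2, y],[x + 1, y],[x + 2,y],[x - 1,y + 1],[x + 1,y + 1]]
-- 	if n == 2:
-- 		l = []
-- 		for i in range(x - 4, x + 5):
-- 			l.append([i,y])
-- 		if x % 2 == 0: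
-- 			for i in range(x - 3, x + 4):
-- 				l.append([i,y - 1])
-- 			l = l + [[x-2,y+1],[x,y+1],[x+2,y+1]]
-- 		if x % 2 == 1:
-- 			for i in range(x - 3, x + 4):
-- 				l.append([i, y + 1])
-- 			l = l + [[x-2,y-1],[x,y-1],[x+2,y-1]]
-- 		return l
-- 	if n == 3:
-- 		l = []
-- 		for i in range(x - 6, x + 7):
-- 			l.append([i,y])
-- 		if x % 2 == 0:
-- 			for i in range(x - 4, x + 5):
-- 				l.append([i,y+1])
-- 			for i in range(x - 5, x + 6):
-- 				l.append([i,y-1])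
-- 			l = l + [[x-3,y-2],[x-1,y-2],[x+1,y-2],[x+3,y-2]]
-- 		if x % 2 == 1:
-- 			for i in range(x - 4, x + 5):
-- 				l.append([i,y-1])
-- 			for i in range(x - 5, x + 6):
-- 				l.append([i,y+1])
-- 			l = l + [[x-3,y+2],[x-1,y+2],[x+1,y+2],[x+3,y+2]]
-- 		return l
--
-- 	if n == 4:
-- 		l = []
-- 		for i in range(x - 8, x + 9):
-- 			l.append([i, y])
-- 		if x % 2 == 0:
-- 			for i in range(x - 6, x + 7):
-- 				l.append([i, y + 1])
-- 			for i in range(x - 7, x + 8):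
-- 				l.append([i, y - 1])
-- 			for i in range(x - 5, x + 6):
-- 				l.append([i, y - 2])
-- 			l = l + [[x-4,y+2],[x-2,y+2],[x,y+2],[x+2,y+2],[x+4,y+2]]
-- 		if x % 2 == 1:
-- 			for i in range(x - 7, x + 8):
-- 				l.append([i,y+1])
-- 			for i in range(x - 5, x + 6):
-- 				l.append([i,y+2])
-- 			for i in range(x - 6, x + 7):
-- 				l.append([i,y-1])
-- 			l = l + [[x-4,y-2],[x-2,y-2],[x,y-2],[x+2,y-2],[x+4,y-2]]
-- 		return l
-- ===== SOURCE B (Python) =====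
-- # B: one constant offset table keyed by (n, x % 2) plus a single mapping pass (objective: simpler).
-- OFFSETS = {
--     (1, 0): [(-1, -1), (-2, 0), (-1, 0), (1, -1), (1, 0), (2, 0)],
--     (1, 1): [(-1, 0), (-2, 0), (1, 0), (2, 0), (-1, 1), (1, 1)],
--     (2, 0): [(-4, 0), (-3, 0), (-2, 0), (-1, 0), (0, 0), (1, 0), (2, 0), (3, 0), (4, 0), (-3, -1), (-2, -1), (-1, -1), (0, -1), (1, -1), (2, -1), (3, -1), (-2, 1), (0, 1), (2, 1)],
--     (2, 1): [(-4, 0), (-3, 0), (-2, 0), (-1, 0), (0, 0), (1, 0), (2, 0), (3, 0), (4, 0), (-3, 1), (-2, 1), (-1, 1), (0, 1), (1, 1), (2, 1), (3, 1), (-2, -1), (0, -1), (2, -1)],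
--     (3, 0): [(-6, 0), (-5, 0), (-4, 0), (-3, 0), (-2, 0), (-1, 0), (0, 0), (1, 0), (2, 0), (3, 0), (4, 0), (5, 0), (6, 0), (-4, 1), (-3, 1), (-2, 1), (-1, 1), (0, 1), (1, 1), (2, 1), (3, 1), (4, 1), (-5, -1), (-4, -1), (-3, -1), (-2, -1), (-1, -1), (0, -1), (1, -1), (2, -1), (3, -1), (4, -1), (5, -1), (-3, -2), (-1, -2), (1, -2), (3, -2)],
--     (3, 1): [(-6, 0), (-5, 0), (-4, 0), (-3, 0), (-2, 0), (-1, 0), (0, 0), (1, 0), (2, 0), (3, 0), (4, 0), (5, 0), (6, 0), (-4, -1), (-3, -1), (-2, -1), (-1, -1), (0, -1), (1, -1), (2, -1), (3, -1), (4, -1), (-5, 1), (-4, 1), (-3, 1), (-2, 1), (-1, 1), (0, 1), (1, 1), (2, 1), (3, 1), (4, 1), (5, 1), (-3, 2), (-1, 2), (1, 2), (3, 2)],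
--     (4, 0): [(-8, 0), (-7, 0), (-6, 0), (-5, 0), (-4, 0), (-3, 0), (-2, 0), (-1, 0), (0, 0), (1, 0), (2, 0), (3, 0), (4, 0), (5, 0), (6, 0), (7, 0), (8, 0), (-6, 1), (-5, 1), (-4, 1), (-3, 1), (-2, 1), (-1, 1), (0, 1), (1, 1), (2, 1), (3, 1), (4, 1), (5, 1), (6, 1), (-7, -1), (-6, -1), (-5, -1), (-4, -1), (-3, -1), (-2, -1), (-1, -1), (0, -1), (1, -1), (2, -1), (3, -1), (4, -1), (5, -1), (6, -1), (7, -1), (-5, -2), (-4, -2), (-3, -2), (-2, -2), (-1, -2), (0, -2), (1, -2), (2, -2), (3, -2), (4, -2), (5, -2), (-4, 2), (-2, 2), (0, 2), (2, 2), (4, 2)],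
--     (4, 1): [(-8, 0), (-7, 0), (-6, 0), (-5, 0), (-4, 0), (-3, 0), (-2, 0), (-1, 0), (0, 0), (1, 0), (2, 0), (3, 0), (4, 0), (5, 0), (6, 0), (7, 0), (8, 0), (-7, 1), (-6, 1), (-5, 1), (-4, 1), (-3, 1), (-2, 1), (-1, 1), (0, 1), (1, 1), (2, 1), (3, 1), (4, 1), (5, 1), (6, 1), (7, 1), (-5, 2), (-4, 2), (-3, 2), (-2, 2), (-1, 2), (0, 2), (1, 2), (2, 2), (3, 2), (4, 2), (5, 2), (-6, -1), (-5, -1), (-4, -1), (-3, -1), (-2, -1), (-1, -1), (0, -1), (1, -1), (2, -1), (3, -1), (4, -1), (5, -1), (6, -1), (-4, -2), (-2, -2), (0, -2), (2, -2), (4, -2)],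
-- }
--
--
-- def rangeCal(x, y, n):
--     offs = OFFSETS.get((n, x % 2))
--     if offs is None:
--         return None
--     return [[x + dx, y + dy] for dx, dy in offs]
-- ===== Notes on version B (the rewrite author's own statement) =====
-- stated objective: simpler
-- what changed: Replaced the four imperative per-n branch bodies (range loops appending to an accumulator plus literal tails) by one constant offset table keyed by (n, x % 2) and a single list-comprehension mapping pass over the looked-up offsets.
-- outside the precondition, e.g. on rangeCal(0, 0, 5): A returns None, B returns None
import Mathlib
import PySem

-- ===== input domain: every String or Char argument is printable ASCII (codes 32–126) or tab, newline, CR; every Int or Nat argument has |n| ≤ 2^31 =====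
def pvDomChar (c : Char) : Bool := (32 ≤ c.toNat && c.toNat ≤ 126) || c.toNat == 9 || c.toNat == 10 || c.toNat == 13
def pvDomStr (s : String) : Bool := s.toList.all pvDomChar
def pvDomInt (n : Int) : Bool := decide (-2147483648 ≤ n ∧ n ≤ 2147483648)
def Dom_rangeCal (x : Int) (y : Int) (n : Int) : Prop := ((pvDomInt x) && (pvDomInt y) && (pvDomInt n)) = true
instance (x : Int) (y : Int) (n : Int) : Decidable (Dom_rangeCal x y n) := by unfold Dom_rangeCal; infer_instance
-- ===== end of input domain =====

-- B replaces the four imperative branch bodies of A by one constant offset table keyed by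
-- (n, x %% 2) and a single mapping pass (objective: simpler).

-- ===== PORT A =====
def rangeCal (x : Int) (y : Int) (n : Int) : List (List Int) :=
  if n == 1 then
    (if PySem.Int.mod x 2 == 0 then
      [[x - 1, y - 1], [x - 2, y], [x - 1, y], [x + 1, y - 1], [x + 1, y], [x + 2, y]]
    else if PySem.Int.mod x 2 == 1 then
      [[x - 1, y], [x - 2, y], [x + 1, y], [x + 2, y], [x - 1, y + 1], [x + 1, y + 1]]
    else [])  -- unreachable: x %% 2 ∈ {0, 1}; Python would fall through to the final None (outside Pre_)
  else if n == 2 then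
    let l : List (List Int) := []
    let l := (PySem.List.pyRange (x - 4) (x + 5) 1).foldl (fun l i => l ++ [[i, y]]) l
    let l := if PySem.Int.mod x 2 == 0 then
        ((PySem.List.pyRange (x - 3) (x + 4) 1).foldl (fun l i => l ++ [[i, y - 1]]) l)
          ++ [[x - 2, y + 1], [x, y + 1], [x + 2, y + 1]]
      else l
    let l := if PySem.Int.mod x 2 == 1 then
        ((PySem.List.pyRange (x - 3) (x + 4) 1).foldl (fun l i => l ++ [[i, y + 1]]) l)
          ++ [[x - 2, y - 1], [x, y - 1], [x + 2, y - 1]]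
      else l
    l
  else if n == 3 then
    let l : List (List Int) := []
    let l := (PySem.List.pyRange (x - 6) (x + 7) 1).foldl (fun l i => l ++ [[i, y]]) l
    let l := if PySem.Int.mod x 2 == 0 then
        ((PySem.List.pyRange (x - 5) (x + 6) 1).foldl (fun l i => l ++ [[i, y - 1]]) ((PySem.List.pyRange (x - 4) (x + 5) 1).foldl (fun l i => l ++ [[i, y + 1]]) l))
          ++ [[x - 3, y - 2], [x - 1, y - 2], [x + 1, y - 2], [x + 3, y - 2]]
      else l
    let l := if PySem.Int.mod x 2 == 1 then
        ((PySem.List.pyRange (x - 5) (x + 6) 1).foldl (fun l i => l ++ [[i, y + 1]]) ((PySem.List.pyRange (x - 4) (x + 5) 1).foldl (fun l i => l ++ [[i, y - 1]]) l))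
          ++ [[x - 3, y + 2], [x - 1, y + 2], [x + 1, y + 2], [x + 3, y + 2]]
      else l
    l
  else if n == 4 then
    let l : List (List Int) := []
    let l := (PySem.List.pyRange (x - 8) (x + 9) 1).foldl (fun l i => l ++ [[i, y]]) l
    let l := if PySem.Int.mod x 2 == 0 then
        ((PySem.List.pyRange (x - 5) (x + 6) 1).foldl (fun l i => l ++ [[i, y - 2]]) ((PySem.List.pyRange (x - 7) (x + 8) 1).foldl (fun l i => l ++ [[i, y - 1]]) ((PySem.List.pyRange (x - 6) (x + 7) 1).foldl (fun l i => l ++ [[i, y + 1]]) l)))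
          ++ [[x - 4, y + 2], [x - 2, y + 2], [x, y + 2], [x + 2, y + 2], [x + 4, y + 2]]
      else l
    let l := if PySem.Int.mod x 2 == 1 then
        ((PySem.List.pyRange (x - 6) (x + 7) 1).foldl (fun l i => l ++ [[i, y - 1]]) ((PySem.List.pyRange (x - 5) (x + 6) 1).foldl (fun l i => l ++ [[i, y + 2]]) ((PySem.List.pyRange (x - 7) (x + 8) 1).foldl (fun l i => l ++ [[i, y + 1]]) l)))
          ++ [[x - 4, y - 2], [x - 2, y - 2], [x, y - 2], [x + 2, y - 2], [x + 4, y - 2]]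
      else l
    l
  else []  -- Python returns None here; excluded by Pre_rangeCal

-- ===== PORT B =====
def OFFSETS : PySem.Dict (Int × Int) (List (Int × Int)) :=
  PySem.Dict.ofList [
    ((1, 0), [(-1, -1), (-2, 0), (-1, 0), (1, -1), (1, 0), (2, 0)]),
    ((1, 1), [(-1, 0), (-2, 0), (1, 0), (2, 0), (-1, 1), (1, 1)]),
    ((2, 0), [(-4, 0), (-3, 0), (-2, 0), (-1, 0), (0, 0), (1, 0), (2, 0), (3, 0), (4, 0), (-3, -1), (-2, -1), (-1, -1), (0, -1), (1, -1), (2, -1), (3, -1), (-2, 1), (0, 1), (2, 1)]),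
    ((2, 1), [(-4, 0), (-3, 0), (-2, 0), (-1, 0), (0, 0), (1, 0), (2, 0), (3, 0), (4, 0), (-3, 1), (-2, 1), (-1, 1), (0, 1), (1, 1), (2, 1), (3, 1), (-2, -1), (0, -1), (2, -1)]),
    ((3, 0), [(-6, 0), (-5, 0), (-4, 0), (-3, 0), (-2, 0), (-1, 0), (0, 0), (1, 0), (2, 0), (3, 0), (4, 0), (5, 0), (6, 0), (-4, 1), (-3, 1), (-2, 1), (-1, 1), (0, 1), (1, 1), (2, 1), (3, 1), (4, 1), (-5, -1), (-4, -1), (-3, -1), (-2, -1), (-1, -1), (0, -1), (1, -1), (2, -1), (3, -1), (4, -1), (5, -1), (-3, -2), (-1, -2), (1, -2), (3, -2)]),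
    ((3, 1), [(-6, 0), (-5, 0), (-4, 0), (-3, 0), (-2, 0), (-1, 0), (0, 0), (1, 0), (2, 0), (3, 0), (4, 0), (5, 0), (6, 0), (-4, -1), (-3, -1), (-2, -1), (-1, -1), (0, -1), (1, -1), (2, -1), (3, -1), (4, -1), (-5, 1), (-4, 1), (-3, 1), (-2, 1), (-1, 1), (0, 1), (1, 1), (2, 1), (3, 1), (4, 1), (5, 1), (-3, 2), (-1, 2), (1, 2), (3, 2)]),
    ((4, 0), [(-8, 0), (-7, 0), (-6, 0), (-5, 0), (-4, 0), (-3, 0), (-2, 0), (-1, 0), (0, 0), (1, 0), (2, 0), (3, 0), (4, 0), (5, 0), (6, 0), (7, 0), (8, 0), (-6, 1), (-5, 1), (-4, 1), (-3, 1), (-2, 1), (-1, 1), (0, 1), (1, 1), (2, 1), (3, 1), (4, 1), (5, 1), (6, 1), (-7, -1), (-6, -1), (-5, -1), (-4, -1), (-3, -1), (-2, -1), (-1, -1), (0, -1), (1, -1), (2, -1), (3, -1), (4, -1), (5, -1), (6, -1), (7, -1), (-5, -2), (-4, -2), (-3, -2), (-2, -2), (-1, -2), (0, -2), (1, -2), (2,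 -2), (3, -2), (4, -2), (5, -2), (-4, 2), (-2, 2), (0, 2), (2, 2), (4, 2)]),
    ((4, 1), [(-8, 0), (-7, 0), (-6, 0), (-5, 0), (-4, 0), (-3, 0), (-2, 0), (-1, 0), (0, 0), (1, 0), (2, 0), (3, 0), (4, 0), (5, 0), (6, 0), (7, 0), (8, 0), (-7, 1), (-6, 1), (-5, 1), (-4, 1), (-3, 1), (-2, 1), (-1, 1), (0, 1), (1, 1), (2, 1), (3, 1), (4, 1), (5, 1), (6, 1), (7, 1), (-5, 2), (-4, 2), (-3, 2), (-2, 2), (-1, 2), (0, 2), (1, 2), (2, 2), (3, 2), (4, 2), (5, 2), (-6, -1), (-5, -1), (-4, -1), (-3, -1), (-2, -1), (-1, -1), (0, -1), (1, -1), (2, -1), (3, -1), (4, -1), (5, -1), (6, -1), (-4, -2), (-2, -2), (0, -2), (2, -2), (4, -2)])]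

def rangeCal_alt (x : Int) (y : Int) (n : Int) : List (List Int) :=
  match OFFSETS.get? (n, PySem.Int.mod x 2) with
  | some offs => offs.map (fun p => [x + p.1, y + p.2])
  | none => []  -- Python B returns None here, like A; excluded by Pre_rangeCal

-- ===== PRECONDITION & SPEC =====
-- Pre_ excludes n ∉ {1, 2, 3, 4}, where A returns None instead of a list of coordinates.
def Pre_rangeCal (x : Int) (y : Int) (n : Int) : Prop := n = 1 ∨ n = 2 ∨ n = 3 ∨ n = 4
instance (x : Int) (y : Int) (n : Int) : Decidable (Pre_rangeCal x y n) := by unfold Pre_rangeCal; infer_instance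
def pvWitness_rangeCal : Int × Int × Int := (2, 5, 3)

def Spec_rangeCal (x : Int) (y : Int) (n : Int) (out : List (List Int)) : Prop := out = rangeCal_alt x y n
instance (x : Int) (y : Int) (n : Int) (out : List (List Int)) : Decidable (Spec_rangeCal x y n out) := by unfold Spec_rangeCal; infer_instance

-- ===== CLAIM (what is proved, stated in full; the proofs are below) =====
def Claim_equal_rangeCal : Prop := ∀ (x : Int) (y : Int) (n : Int), Dom_rangeCal x y n → Pre_rangeCal x y n → Spec_rangeCal x y n (rangeCal x y n)

-- ===== LEMMAS AND PROOFS =====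

-- an append-accumulator loop is init ++ map
theorem foldl_app_map (f : Int → List Int) (xs : List Int) (l : List (List Int)) :
    xs.foldl (fun l i => l ++ [f i]) l = l ++ xs.map f := by
  induction xs generalizing l with
  | nil => simp
  | cons a t ih => simp [List.foldl_cons, ih]

-- a range of known constant width, as a map over List.range
theorem pr (a b : Int) (k : Nat) (h : b - a = (k : Int)) :
    PySem.List.pyRange a b 1 = (List.range k).map (fun j : Nat => a + (j : Int)) := by
  rw [PySem.List.pyRange_one, h, Int.toNat_natCast]

-- ===== VERDICT =====
set_option maxHeartbeats 2000000 in
theorem rangeCal_spec : Claim_equal_rangeCal := by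
  intro x y n _ pre
  unfold Spec_rangeCal rangeCal rangeCal_alt
  have hm : PySem.Int.mod x 2 = x % 2 := PySem.Int.mod_eq_emod_of_pos (by norm_num)
  rw [hm]
  rcases Int.emod_two_eq x with hp | hp <;> rw [hp] <;>
    rcases pre with hn | hn | hn | hn <;> subst hn
  · -- n = 1, x %% 2 = 0
    have hg : OFFSETS.get? (1, 0) = some [(-1, -1), (-2, 0), (-1, 0), (1, -1), (1, 0), (2, 0)] := by decide
    rw [hg]
    norm_num
    omega
  · -- n = 2, x %% 2 = 0
    have hg : OFFSETS.get? (2, 0) = some [(-4, 0), (-3, 0), (-2, 0), (-1, 0), (0, 0), (1, 0), (2, 0), (3, 0), (4, 0), (-3, -1), (-2, -1), (-1, -1), (0, -1), (1, -1), (2, -1), (3, -1), (-2, 1), (0, 1), (2, 1)] := by decide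
    rw [pr (x - 4) (x + 5) 9 (by ring), pr (x - 3) (x + 4) 7 (by ring), hg]
    norm_num [foldl_app_map, List.range_succ]
    omega
  · -- n = 3, x %% 2 = 0
    have hg : OFFSETS.get? (3, 0) = some [(-6, 0), (-5, 0), (-4, 0), (-3, 0), (-2, 0), (-1, 0), (0, 0), (1, 0), (2, 0), (3, 0), (4, 0), (5, 0), (6, 0), (-4, 1), (-3, 1), (-2, 1), (-1, 1), (0, 1), (1, 1), (2, 1), (3, 1), (4, 1), (-5, -1), (-4, -1), (-3, -1), (-2, -1), (-1, -1), (0, -1), (1, -1), (2, -1), (3, -1), (4, -1), (5, -1), (-3, -2), (-1, -2), (1, -2), (3, -2)] := by decide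
    rw [pr (x - 6) (x + 7) 13 (by ring), pr (x - 4) (x + 5) 9 (by ring), pr (x - 5) (x + 6) 11 (by ring), hg]
    norm_num [foldl_app_map, List.range_succ]
    omega
  · -- n = 4, x %% 2 = 0
    have hg : OFFSETS.get? (4, 0) = some [(-8, 0), (-7, 0), (-6, 0), (-5, 0), (-4, 0), (-3, 0), (-2, 0), (-1, 0), (0, 0), (1, 0), (2, 0), (3, 0), (4, 0), (5, 0), (6, 0), (7, 0), (8, 0), (-6, 1), (-5, 1), (-4, 1), (-3, 1), (-2, 1), (-1, 1), (0, 1), (1, 1), (2, 1), (3, 1), (4, 1), (5, 1), (6, 1), (-7, -1), (-6, -1), (-5, -1), (-4, -1), (-3, -1), (-2, -1), (-1, -1), (0, -1), (1, -1), (2, -1), (3, -1), (4, -1), (5, -1), (6, -1), (7, -1), (-5, -2), (-4, -2), (-3, -2), (-2, -2), (-1, -2), (0, -2), (1, -2), (2, -2), (3, -2), (4, -2), (5, -2), (-4, 2), (-2, 2), (0, 2), (2, 2), (4, 2)] := by decide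
    rw [pr (x - 8) (x + 9) 17 (by ring), pr (x - 6) (x + 7) 13 (by ring), pr (x - 7) (x + 8) 15 (by ring), pr (x - 5) (x + 6) 11 (by ring), hg]
    norm_num [foldl_app_map, List.range_succ]
    omega
  · -- n = 1, x %% 2 = 1
    have hg : OFFSETS.get? (1, 1) = some [(-1, 0), (-2, 0), (1, 0), (2, 0), (-1, 1), (1, 1)] := by decide
    rw [hg]
    norm_num
    omega
  · -- n = 2, x %% 2 = 1
    have hg : OFFSETS.get? (2, 1) = some [(-4, 0), (-3, 0), (-2, 0), (-1, 0), (0, 0), (1, 0), (2, 0), (3, 0), (4, 0), (-3, 1), (-2, 1), (-1, 1), (0, 1), (1, 1), (2, 1), (3, 1), (-2, -1), (0, -1), (2, -1)] := by decide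
    rw [pr (x - 4) (x + 5) 9 (by ring), pr (x - 3) (x + 4) 7 (by ring), hg]
    norm_num [foldl_app_map, List.range_succ]
    omega
  · -- n = 3, x %% 2 = 1
    have hg : OFFSETS.get? (3, 1) = some [(-6, 0), (-5, 0), (-4, 0), (-3, 0), (-2, 0), (-1, 0), (0, 0), (1, 0), (2, 0), (3, 0), (4, 0), (5, 0), (6, 0), (-4, -1), (-3, -1), (-2, -1), (-1, -1), (0, -1), (1, -1), (2, -1), (3, -1), (4, -1), (-5, 1), (-4, 1), (-3, 1), (-2, 1), (-1, 1), (0, 1), (1, 1), (2, 1), (3, 1), (4, 1), (5, 1), (-3, 2), (-1, 2), (1, 2), (3, 2)] := by decide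
    rw [pr (x - 6) (x + 7) 13 (by ring), pr (x - 4) (x + 5) 9 (by ring), pr (x - 5) (x + 6) 11 (by ring), hg]
    norm_num [foldl_app_map, List.range_succ]
    omega
  · -- n = 4, x %% 2 = 1
    have hg : OFFSETS.get? (4, 1) = some [(-8, 0), (-7, 0), (-6, 0), (-5, 0), (-4, 0), (-3, 0), (-2, 0), (-1, 0), (0, 0), (1, 0), (2, 0), (3, 0), (4, 0), (5, 0), (6, 0), (7, 0), (8, 0), (-7, 1), (-6, 1), (-5, 1), (-4, 1), (-3, 1), (-2, 1), (-1, 1), (0, 1), (1, 1), (2, 1), (3, 1), (4, 1), (5, 1), (6, 1), (7, 1), (-5, 2), (-4, 2), (-3, 2), (-2, 2), (-1, 2), (0, 2), (1, 2), (2, 2), (3, 2), (4, 2), (5, 2), (-6, -1), (-5, -1), (-4, -1), (-3, -1), (-2, -1), (-1, -1), (0, -1), (1, -1), (2, -1), (3, -1), (4, -1), (5, -1), (6, -1), (-4, -2), (-2, -2), (0, -2), (2, -2), (4, -2)] := by decide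
    rw [pr (x - 8) (x + 9) 17 (by ring), pr (x - 6) (x + 7) 13 (by ring), pr (x - 7) (x + 8) 15 (by ring), pr (x - 5) (x + 6) 11 (by ring), hg]
    norm_num [foldl_app_map, List.range_succ]
    omega
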